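-- pv_equiv track=rewrite | github.com/pintxo1/corpus-etnografico-galicia | 02_methods/scripts_ethno/build_kwic_cases.py | extract_kwic_window
-- ===== SOURCE A (Python) =====
-- from typing import Dict, List, Tuple
--
-- def extract_kwic_window(text: str, match_start: int, match_end: int, window_tokens: int = 80) -> Tuple[str, str, int, int]:
--     """
--     Extraer KWIC + ventana de contexto.
--
--     Returns:
--         (kwic, ventana_texto, window_start_idx, window_end_idx)
--     """
--     tokens = text.split()
--
--     # Calcular índices de token del match
--     text_before_match = text[:match_start]
--     text_match = text[match_start:match_end]
--
--     token_start = len(text_before_match.split())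
--     token_end = token_start + len(text_match.split())
--
--     # Ventana de contexto (±window_tokens)
--     window_start = max(0, token_start - window_tokens)
--     window_end = min(len(tokens), token_end + window_tokens)
--
--     # Reconstruir textos
--     kwic_tokens = (
--         tokens[max(0, token_start - 5):token_start] +
--         ['**' + t + '**' for t in tokens[token_start:token_end]] +
--         tokens[token_end:min(len(tokens), token_end + 5)]
--     )
--     kwic = ' '.join(kwic_tokens)
--
--     ventana_tokens_list = tokens[window_start:window_end]
--     ventana_texto = ' '.join(ventana_tokens_list)
--
--     # Calcular índices de caracteres de la ventana
--     window_start_char = len(' '.join(tokens[:window_start])) + (1 if window_start > 0 else 0)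
--     window_end_char = len(' '.join(tokens[:window_end]))
--
--     return kwic, ventana_texto, window_start_char, window_end_char
-- ===== SOURCE B (Python) =====
-- def extract_kwic_window(text: str, match_start: int, match_end: int, window_tokens: int = 80):
--     tokens = text.split()
--     n = len(tokens)
--     token_start = len(text[:match_start].split())
--     token_end = token_start + len(text[match_start:match_end].split())
--     window_start = max(0, token_start - window_tokens)
--     window_end = min(n, token_end + window_tokens)
--     # prefix table: cum[k] = character offset at which token k starts in ' '.join(tokens)
--     cum = [0]
--     off = 0
--     for t in tokens:
--         off += len(t) + 1
--         cum.append(off)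
--     kwic = ' '.join(
--         '**' + tokens[i] + '**' if token_start <= i < token_end else tokens[i]
--         for i in range(max(0, token_start - 5), min(n, token_end + 5))
--     )
--     ventana = ' '.join(tokens[window_start:window_end])
--     window_start_char = cum[window_start]
--     window_end_char = cum[window_end] - 1 if window_end > 0 else 0
--     return kwic, ventana, window_start_char, window_end_char
-- ===== Notes on version B (the rewrite author's own statement) =====
-- stated objective: alternative
-- what changed: B builds one cumulative character-offset prefix table over the tokens and reads both window character indices from it in O(1), and produces the KWIC line in a single pass over one index range with an inline highlight test, instead of A's three-slice concatenation and two separate ' '.join(prefix)-length measurements.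
-- outside the precondition, e.g. on extract_kwic_window('', 0, 0, -1): A returns ('', '', 1, 0), B raises IndexError
import Mathlib
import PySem

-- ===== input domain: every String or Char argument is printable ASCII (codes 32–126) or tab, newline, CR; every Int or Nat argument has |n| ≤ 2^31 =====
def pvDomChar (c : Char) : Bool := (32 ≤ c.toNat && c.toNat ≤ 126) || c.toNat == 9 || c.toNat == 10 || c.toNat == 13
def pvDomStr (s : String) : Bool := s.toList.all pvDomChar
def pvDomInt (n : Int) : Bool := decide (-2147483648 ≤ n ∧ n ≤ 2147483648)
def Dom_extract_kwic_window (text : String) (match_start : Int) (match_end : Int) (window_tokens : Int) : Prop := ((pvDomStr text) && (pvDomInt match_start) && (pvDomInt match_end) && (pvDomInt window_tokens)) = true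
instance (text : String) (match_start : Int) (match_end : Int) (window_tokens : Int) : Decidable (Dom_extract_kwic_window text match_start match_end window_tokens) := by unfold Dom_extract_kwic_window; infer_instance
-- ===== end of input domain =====

-- B replaces A's repeated ' '.join(prefix)-length measurements and three-slice KWIC concatenation by one
-- cumulative character-offset table over the tokens and a single decorated index range (objective: alternative).

-- Python string concatenation 'a + b', exact: a String is its list of code points
def strCat (a b : String) : String := String.ofList (a.toList ++ b.toList)

-- ===== PORT A =====
def extract_kwic_window (text : String) (match_start : Int) (match_end : Int) (window_tokens : Int) : String × String × Int × Int :=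
  let tokens := PySem.Str.split₀ text
  let text_before_match := PySem.Str.slice text none (some match_start)
  let text_match := PySem.Str.slice text (some match_start) (some match_end)
  let token_start : Int := PySem.List.len (PySem.Str.split₀ text_before_match)
  let token_end : Int := token_start + PySem.List.len (PySem.Str.split₀ text_match)
  let window_start : Int := max 0 (token_start - window_tokens)
  let window_end : Int := min (PySem.List.len tokens) (token_end + window_tokens)
  let kwic_tokens :=
    PySem.List.slice tokens (some (max 0 (token_start - 5))) (some token_start)
      ++ List.map (fun t => strCat (strCat "**" t) "**") (PySem.List.slice tokens (some token_start) (some token_end))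
      ++ PySem.List.slice tokens (some token_end) (some (min (PySem.List.len tokens) (token_end + 5)))
  let kwic := PySem.Str.join " " kwic_tokens
  let ventana_texto := PySem.Str.join " " (PySem.List.slice tokens (some window_start) (some window_end))
  let window_start_char : Int := PySem.Str.len (PySem.Str.join " " (PySem.List.slice tokens none (some window_start))) + (if window_start > 0 then 1 else 0)
  let window_end_char : Int := PySem.Str.len (PySem.Str.join " " (PySem.List.slice tokens none (some window_end)))
  (kwic, ventana_texto, window_start_char, window_end_char)

-- ===== PORT B =====
def extract_kwic_window_alt (text : String) (match_start : Int) (match_end : Int) (window_tokens : Int) : String × String × Int × Int :=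
  let tokens := PySem.Str.split₀ text
  let n : Int := PySem.List.len tokens
  let token_start : Int := PySem.List.len (PySem.Str.split₀ (PySem.Str.slice text none (some match_start)))
  let token_end : Int := token_start + PySem.List.len (PySem.Str.split₀ (PySem.Str.slice text (some match_start) (some match_end)))
  let window_start : Int := max 0 (token_start - window_tokens)
  let window_end : Int := min n (token_end + window_tokens)
  -- cum/off loop: cum[k] = character offset at which token k starts in ' '.join(tokens)
  let cum : List Int := (tokens.foldl
      (fun (p : List Int × Int) t => (p.1 ++ [p.2 + PySem.Str.len t + 1], p.2 + PySem.Str.len t + 1))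
      ([0], 0)).1
  let kwic := PySem.Str.join " " (List.map
      (fun i => if token_start ≤ i ∧ i < token_end
                then strCat (strCat "**" (PySem.List.pyGetD tokens i "")) "**"
                else PySem.List.pyGetD tokens i "")
      (PySem.List.pyRange (max 0 (token_start - 5)) (min n (token_end + 5)) 1))
  let ventana := PySem.Str.join " " (PySem.List.slice tokens (some window_start) (some window_end))
  let window_start_char : Int := PySem.List.pyGetD cum window_start 0
  let window_end_char : Int := if window_end > 0 then PySem.List.pyGetD cum window_end 0 - 1 else 0
  (kwic, ventana, window_start_char, window_end_char)

-- ===== PRECONDITION & SPEC =====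
-- Pre_ excludes negative window_tokens (a meaningless window size): there A can return out-of-range
-- character offsets while B's prefix-table lookup raises IndexError.
def Pre_extract_kwic_window (text : String) (match_start : Int) (match_end : Int) (window_tokens : Int) : Prop :=
  0 ≤ window_tokens
instance (text : String) (match_start : Int) (match_end : Int) (window_tokens : Int) : Decidable (Pre_extract_kwic_window text match_start match_end window_tokens) := by unfold Pre_extract_kwic_window; infer_instance

def pvWitness_extract_kwic_window : String × Int × Int × Int := ("ola mundo galego", 4, 9, 1)

def Spec_extract_kwic_window (text : String) (match_start : Int) (match_end : Int) (window_tokens : Int) (out : String × String × Int × Int) : Prop := out = extract_kwic_window_alt text match_start match_end window_tokens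
instance (text : String) (match_start : Int) (match_end : Int) (window_tokens : Int) (out : String × String × Int × Int) : Decidable (Spec_extract_kwic_window text match_start match_end window_tokens out) := by unfold Spec_extract_kwic_window; infer_instance

-- ===== CLAIM (what is proved, stated in full; the proofs are below) =====
def Claim_equal_extract_kwic_window : Prop := ∀ (text : String) (match_start : Int) (match_end : Int) (window_tokens : Int), Dom_extract_kwic_window text match_start match_end window_tokens → Pre_extract_kwic_window text match_start match_end window_tokens → Spec_extract_kwic_window text match_start match_end window_tokens (extract_kwic_window text match_start match_end window_tokens)

-- ===== LEMMAS AND PROOFS =====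

theorem pv_go_len_ge (s : List Char) : ∀ (cur : List Char) (acc : List (List Char)),
    acc.length ≤ (PySem.Chars.split₀.go s cur acc).length := by
  induction s with
  | nil => intro cur acc; simp only [PySem.Chars.split₀.go]; split <;> simp
  | cons c rest ih =>
    intro cur acc
    simp only [PySem.Chars.split₀.go]
    split
    · split
      · exact ih [] acc
      · have := ih [] (cur.reverse :: acc); simp at this; omega
    · exact ih (c :: cur) acc

theorem pv_go_len_ge' (s : List Char) : ∀ (cur : List Char) (acc : List (List Char)), cur ≠ [] →
    acc.length + 1 ≤ (PySem.Chars.split₀.go s cur acc).length := by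
  induction s with
  | nil =>
    intro cur acc h
    simp only [PySem.Chars.split₀.go]
    split
    · simp_all [List.isEmpty_iff]
    · simp
  | cons c rest ih =>
    intro cur acc h
    simp only [PySem.Chars.split₀.go]
    split
    · split
      · simp_all [List.isEmpty_iff]
      · have := pv_go_len_ge rest [] (cur.reverse :: acc); simp at this; omega
    · exact ih (c :: cur) acc (by simp)

theorem pv_go_nil_le (s cur : List Char) (acc : List (List Char)) :
    (PySem.Chars.split₀.go [] cur acc).length ≤ (PySem.Chars.split₀.go s cur acc).length := by
  simp only [PySem.Chars.split₀.go]
  split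
  · rename_i hcur
    simpa using pv_go_len_ge s cur acc
  · rename_i hcur
    have hcur2 : cur ≠ [] := by simpa [List.isEmpty_iff] using hcur
    simpa using pv_go_len_ge' s cur acc hcur2

theorem pv_go_take_le (s : List Char) : ∀ (k : Nat) (cur : List Char) (acc : List (List Char)),
    (PySem.Chars.split₀.go (s.take k) cur acc).length ≤ (PySem.Chars.split₀.go s cur acc).length := by
  induction s with
  | nil => intro k cur acc; simp
  | cons c rest ih =>
    intro k cur acc
    cases k with
    | zero =>
      simpa using pv_go_nil_le (c :: rest) cur acc
    | succ k' =>
      simp only [List.take_succ_cons]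
      simp only [PySem.Chars.split₀.go]
      split
      · split
        · exact ih k' [] acc
        · exact ih k' [] _
      · exact ih k' (c :: cur) acc

theorem pv_split₀_take_le (cs : List Char) (k : Nat) :
    (PySem.Chars.split₀ (cs.take k)).length ≤ (PySem.Chars.split₀ cs).length := by
  simpa [PySem.Chars.split₀] using pv_go_take_le cs k [] []

theorem pv_prefix_tokens_le (text : String) (ms : Int) :
    (PySem.Str.split₀ (PySem.Str.slice text none (some ms))).length ≤ (PySem.Str.split₀ text).length := by
  have h1 : ∀ s : String, (PySem.Str.split₀ s).length = (PySem.Chars.split₀ s.toList).length := by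
    intro s
    rw [← PySem.Str.split₀_map_toList s, List.length_map]
  rw [h1, h1]
  have h2 : ∃ j : Nat, (PySem.Str.slice text none (some ms)).toList = text.toList.take j := by
    rcases le_or_gt 0 ms with h | h
    · refine ⟨ms.toNat, ?_⟩
      rw [PySem.Str.toList_slice, PySem.Chars.slice_eq_listSlice, PySem.List.slice_to _ h]
    · refine ⟨text.toList.length - (-ms).toNat, ?_⟩
      rw [PySem.Str.toList_slice, PySem.Chars.slice_eq_listSlice]
      have : ms = -((-ms).toNat : Int) := by omega
      rw [this, PySem.List.slice_to_neg_natCast _ _ (by omega)]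
      congr 1
      omega
  obtain ⟨j, hj⟩ := h2
  rw [hj]
  exact pv_split₀_take_le _ j

def pvW (l : List String) : Int := (l.map (fun t => PySem.Str.len t + 1)).sum

theorem pv_foldl_cum (l : List String) : ∀ (c : List Int) (o : Int),
    l.foldl (fun (p : List Int × Int) t => (p.1 ++ [p.2 + PySem.Str.len t + 1], p.2 + PySem.Str.len t + 1)) (c, o)
      = (c ++ (List.range l.length).map (fun j => o + pvW (l.take (j + 1))), o + pvW l) := by
  induction l with
  | nil => intro c o; simp [pvW]
  | cons t rest ih =>
    intro c o
    simp only [List.foldl_cons]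
    rw [ih]
    refine Prod.ext ?_ ?_
    · simp only [List.length_cons, List.range_succ_eq_map, List.map_cons, List.map_map]
      simp only [List.append_assoc, List.singleton_append]
      simp [pvW]
      exact ⟨by ring, fun a _ => by ring⟩
    · simp [pvW]
      ring

theorem pv_join_len (l : List String) (h : l ≠ []) :
    PySem.Str.len (PySem.Str.join " " l) = pvW l - 1 := by
  induction l with
  | nil => simp at h
  | cons x rest ih =>
    cases rest with
    | nil =>
      simp [PySem.Str.len, PySem.Str.toList_join, PySem.Chars.join_singleton, pvW]
    | cons y r =>
      simp only [PySem.Str.len, PySem.Str.toList_join] at *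
      rw [List.map_cons, List.map_cons, PySem.Chars.join_cons_cons, ← List.map_cons]
      have := ih (by simp)
      simp only [List.length_append]
      simp only [pvW, List.map_cons, List.sum_cons] at *
      simp only [PySem.Str.len] at this ⊢
      push_cast
      push_cast at this
      simp at this ⊢
      omega

theorem pv_cum_getD (toks : List String) (k : Nat) (hk : k ≤ toks.length) :
    PySem.List.pyGetD ((toks.foldl
        (fun (p : List Int × Int) t => (p.1 ++ [p.2 + PySem.Str.len t + 1], p.2 + PySem.Str.len t + 1))
        ([0], 0)).1) (k : Int) 0
      = if k = 0 then 0 else pvW (toks.take k) := by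
  rw [pv_foldl_cum]
  rw [PySem.List.pyGetD_natCast]
  cases k with
  | zero => simp
  | succ m =>
    simp only [List.singleton_append, List.getD_cons_succ]
    rw [List.getD_eq_getElem _ _ (by simpa using hk)]
    simp

theorem pv_pyRange_natCast (a b : Nat) :
    PySem.List.pyRange (a : Int) (b : Int) 1 = (List.range' a (b - a)).map (fun (k : Nat) => (k : Int)) := by
  unfold PySem.List.pyRange
  rw [if_neg (by norm_num : ¬ (1:Int) = 0)]
  have hcount : (if (0:Int) < 1 then if (a:Int) < (b:Int) then (((b:Int) - (a:Int) + 1 - 1) / 1).toNat else 0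
      else if (b:Int) < (a:Int) then (((a:Int) - (b:Int) + -1 - 1) / -1).toNat else 0) = b - a := by
    rw [if_pos (by norm_num)]
    split <;> omega
  rw [hcount]
  apply List.ext_getElem
  · simp
  · intro i h1 h2
    simp only [List.getElem_map, List.getElem_range, List.getElem_range']
    push_cast
    ring

theorem pv_map_range'_getD {α β : Type} (xs : List α) (F : α → β) (d : α) :
    ∀ (m a : Nat), a + m ≤ xs.length →
    (List.range' a m).map (fun k => F (xs.getD k d)) = ((xs.drop a).take m).map F := by
  intro m
  induction m with
  | zero => intro a _; simp
  | succ m ih =>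
    intro a h
    rw [List.range'_succ, List.map_cons]
    have ha : a < xs.length := by omega
    rw [← List.getElem_cons_drop ha, List.take_succ_cons, List.map_cons]
    congr 1
    · rw [List.getD_eq_getElem _ _ ha]
    · have := ih (a+1) (by omega)
      simpa using this

theorem pv_kwic_eq (toks : List String) (tsn tmn : Nat) (h : tsn ≤ toks.length) :
    PySem.List.slice toks (some (max 0 ((tsn : Int) - 5))) (some (tsn : Int))
      ++ List.map (fun t => strCat (strCat "**" t) "**") (PySem.List.slice toks (some (tsn : Int)) (some ((tsn : Int) + (tmn : Int))))
      ++ PySem.List.slice toks (some ((tsn : Int) + (tmn : Int))) (some (min ((toks.length : Int)) ((tsn : Int) + (tmn : Int) + 5)))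
    = List.map
        (fun i => if (tsn : Int) ≤ i ∧ i < (tsn : Int) + (tmn : Int)
                  then strCat (strCat "**" (PySem.List.pyGetD toks i "")) "**"
                  else PySem.List.pyGetD toks i "")
        (PySem.List.pyRange (max 0 ((tsn : Int) - 5)) (min ((toks.length : Int)) ((tsn : Int) + (tmn : Int) + 5)) 1) := by
  have h1 : max 0 ((tsn : Int) - 5) = ((tsn - 5 : Nat) : Int) := by omega
  have h2 : (tsn : Int) + (tmn : Int) = ((tsn + tmn : Nat) : Int) := by push_cast; ring
  have h3 : min ((toks.length : Int)) ((tsn : Int) + (tmn : Int) + 5) = ((min toks.length (tsn + tmn + 5) : Nat) : Int) := by omega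
  rw [h1, h3, h2]
  set n := toks.length with hn
  set a := tsn - 5 with ha
  set te := tsn + tmn with hte
  set b := min n (te + 5) with hb
  set m2 := min te b with hm2
  rw [PySem.List.slice_natCast, PySem.List.slice_natCast, PySem.List.slice_natCast, pv_pyRange_natCast]
  have hsplit : List.range' a (b - a) = List.range' a (tsn - a) ++ List.range' tsn (m2 - tsn) ++ List.range' m2 (b - m2) := by
    have e1 : (tsn - a) + ((m2 - tsn) + (b - m2)) = b - a := by omega
    rw [← e1, ← List.range'_append (s := a) (m := tsn - a) (step := 1)]
    have e2 : a + 1 * (tsn - a) = tsn := by omega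
    rw [e2, ← List.range'_append (s := tsn) (m := m2 - tsn) (step := 1)]
    have e3 : tsn + 1 * (m2 - tsn) = m2 := by omega
    rw [e3, List.append_assoc]
  rw [hsplit, List.map_append, List.map_append, List.map_append, List.map_append]
  congr 1
  · congr 1
    -- piece 1: plain left context
    · rw [List.map_map]
      rw [List.map_congr_left (g := fun k => (fun t => t) (toks.getD k ""))
          (by intro k hk
              have hkb := List.mem_range'_1.mp hk
              have hnot : ¬ ((tsn : Int) ≤ (k : Int) ∧ (k : Int) < ((te : Nat) : Int)) := by omega
              simp only [Function.comp_apply, if_neg hnot, PySem.List.pyGetD_natCast])]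
      rw [pv_map_range'_getD toks (fun t => t) "" (tsn - a) a (by omega)]
      simp
  -- piece 2: decorated match tokens
    · rw [List.map_map]
      rw [List.map_congr_left (g := fun k => (fun t => strCat (strCat "**" t) "**") (toks.getD k ""))
          (by intro k hk
              have hkb := List.mem_range'_1.mp hk
              have hyes : ((tsn : Int) ≤ (k : Int) ∧ (k : Int) < ((te : Nat) : Int)) := by omega
              simp only [Function.comp_apply, if_pos hyes, PySem.List.pyGetD_natCast])]
      rw [pv_map_range'_getD toks (fun t => strCat (strCat "**" t) "**") "" (m2 - tsn) tsn (by omega)]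
      have htake : List.take (te - tsn) (List.drop tsn toks) = List.take (m2 - tsn) (List.drop tsn toks) := by
        apply List.take_eq_take_iff.mpr
        simp
        omega
      rw [htake]
  -- piece 3: plain right context
  · rcases le_or_gt te b with hcase | hcase
    · have hm2e : m2 = te := by omega
      rw [List.map_map]
      rw [List.map_congr_left (g := fun k => (fun t => t) (toks.getD k ""))
          (by intro k hk
              have hkb := List.mem_range'_1.mp hk
              have hnot : ¬ ((tsn : Int) ≤ (k : Int) ∧ (k : Int) < ((te : Nat) : Int)) := by omega
              simp only [Function.comp_apply, if_neg hnot, PySem.List.pyGetD_natCast])]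
      rw [pv_map_range'_getD toks (fun t => t) "" (b - m2) m2 (by omega)]
      rw [hm2e]
      simp
    · have hz1 : b - te = 0 := by omega
      have hz2 : b - m2 = 0 := by omega
      rw [hz1, hz2]
      simp

theorem pv_join_take_len (toks : List String) (k : Nat) (hk : k ≤ toks.length) :
    PySem.Str.len (PySem.Str.join " " (toks.take k)) = if k = 0 then 0 else pvW (toks.take k) - 1 := by
  by_cases h0 : k = 0
  · subst h0
    simp [PySem.Str.len, PySem.Str.toList_join, PySem.Chars.join_nil]
  · rw [if_neg h0]
    apply pv_join_len
    intro hnil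
    have := congrArg List.length hnil
    simp only [List.length_take, List.length_nil] at this
    omega

-- ===== VERDICT (by name: the statement is the Claim_ definition above) =====
theorem extract_kwic_window_spec : Claim_equal_extract_kwic_window := by
  intro text ms me wt hdom hpre
  have hpre' : (0 : Int) ≤ wt := hpre
  have hts : (PySem.Str.split₀ (PySem.Str.slice text none (some ms))).length ≤ (PySem.Str.split₀ text).length :=
    pv_prefix_tokens_le text ms
  unfold Spec_extract_kwic_window extract_kwic_window extract_kwic_window_alt
  dsimp only
  simp only [PySem.List.len_eq, gt_iff_lt, Prod.mk.injEq]
  set toks := PySem.Str.split₀ text with htoks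
  set tsn := (PySem.Str.split₀ (PySem.Str.slice text none (some ms))).length with htsn
  set tmn := (PySem.Str.split₀ (PySem.Str.slice text (some ms) (some me))).length with htmn
  have hws : max 0 ((tsn : Int) - wt) = ((tsn - wt.toNat : Nat) : Int) := by omega
  have hwe : min ((toks.length : Int)) ((tsn : Int) + (tmn : Int) + wt) = ((min toks.length (tsn + tmn + wt.toNat) : Nat) : Int) := by omega
  refine ⟨?_, ?_, ?_, ?_⟩
  · exact congrArg (PySem.Str.join " ") (pv_kwic_eq toks tsn tmn hts)
  · trivial
  · rw [hws, PySem.List.slice_to_natCast, pv_cum_getD toks _ (by omega), pv_join_take_len toks _ (by omega)]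
    split_ifs <;> omega
  · rw [hwe, PySem.List.slice_to_natCast, pv_cum_getD toks _ (by omega), pv_join_take_len toks _ (by omega)]
    split_ifs <;> omega
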